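-- pv_equiv track=rewrite | github.com/NickPanyushev/homework | homework/hw4/task2.py | count_word_classes
-- ===== SOURCE A (Python) =====
-- def find_words(file):  # функция выдает лист
--     words = file.split("\n")
--     return words
--
-- def count_word_classes(file):  # функция возвращает словарь с количеством nouns, adj, verbs
--     words = find_words(file)  # нашли все слова из списка
--     word_classes = {'nouns': 0, 'adj': 0, 'verbs': 0}
--     for k in words:  # бежимся по списку слов
--         if k[-2:] == "yo":  # нашли adj
--             word_classes['adj'] += 1
--         elif k[-2:] == "ka":  # нашли nouns
--             word_classes['nouns'] += 1
--         else:  # иначе- глаголы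
--             word_classes['verbs'] += 1
--     return word_classes
-- ===== SOURCE B (Python) =====
-- def count_word_classes(file):
--     lines = file.split("\n")
--     adj = sum(1 for l in lines if l.endswith("yo"))
--     nouns = sum(1 for l in lines if l.endswith("ka"))
--     return {'nouns': nouns, 'adj': adj, 'verbs': len(lines) - adj - nouns}
-- ===== Notes on version B (the rewrite author's own statement) =====
-- stated objective: simpler
-- what changed: Replaced A's single branching loop that mutates a dict with three independent closed computations: two endswith-counting passes for adj and nouns and a closed-form remainder len(lines) - adj - nouns for verbs, building the dict once at the end.
import Mathlib
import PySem

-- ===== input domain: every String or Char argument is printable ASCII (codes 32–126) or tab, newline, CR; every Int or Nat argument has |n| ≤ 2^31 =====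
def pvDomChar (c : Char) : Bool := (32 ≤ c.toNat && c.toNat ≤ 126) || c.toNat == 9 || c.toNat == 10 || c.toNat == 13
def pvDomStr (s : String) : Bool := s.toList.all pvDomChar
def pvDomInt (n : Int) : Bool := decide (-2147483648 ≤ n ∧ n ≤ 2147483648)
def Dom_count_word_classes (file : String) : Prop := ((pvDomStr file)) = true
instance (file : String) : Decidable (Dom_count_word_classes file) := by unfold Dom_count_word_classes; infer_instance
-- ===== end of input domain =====

-- B replaces A's single branching dict-mutating loop by two endswith-counting passes and a
-- closed-form remainder for verbs (objective: simpler).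

-- ===== PORT A =====
-- find_words(file): file.split("\n"); the separator is nonempty so split? is always some
def pvFindWords (file : String) : List String :=
  (PySem.Str.split? file "\n").getD []

def count_word_classes (file : String) : List (String × Int) :=
  let words := pvFindWords file
  let init : PySem.Dict String Int := PySem.Dict.mk [("nouns", 0), ("adj", 0), ("verbs", 0)]
  (words.foldl (fun wc k =>
      if PySem.Str.slice k (some (-2)) none == "yo" then
        wc.modify "adj" 0 (· + 1)
      else if PySem.Str.slice k (some (-2)) none == "ka" then
        wc.modify "nouns" 0 (· + 1)
      else
        wc.modify "verbs" 0 (· + 1)) init).items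

-- ===== PORT B =====
def count_word_classes_alt (file : String) : List (String × Int) :=
  let lines := (PySem.Str.split? file "\n").getD []
  let adj : Int := (lines.countP (fun l => PySem.Str.endswith l "yo") : Int)
  let nouns : Int := (lines.countP (fun l => PySem.Str.endswith l "ka") : Int)
  [("nouns", nouns), ("adj", adj), ("verbs", (lines.length : Int) - adj - nouns)]

-- ===== PRECONDITION & SPEC =====
def Spec_count_word_classes (file : String) (out : List (String × Int)) : Prop := out = count_word_classes_alt file
instance (file : String) (out : List (String × Int)) : Decidable (Spec_count_word_classes file out) := by unfold Spec_count_word_classes; infer_instance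

-- ===== CLAIM (what is proved, stated in full; the proofs are below) =====
def Claim_equal_count_word_classes : Prop := ∀ (file : String), Dom_count_word_classes file → Spec_count_word_classes file (count_word_classes file)

-- ===== LEMMAS AND PROOFS =====

-- k[-2:] == p (for a 2-character p) is exactly endswith(k, p)
theorem slice2_eq_endswith (k p : String) (hp : p.toList.length = 2) :
    (PySem.Str.slice k (some (-2)) none == p) = PySem.Str.endswith k p := by
  have h1 : (PySem.Str.slice k (some (-2)) none).toList
      = k.toList.drop (k.toList.length - 2) := by
    rw [PySem.Str.toList_slice, PySem.Chars.slice_eq_listSlice,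
        PySem.List.slice_from_neg_ofNat k.toList 2 (by omega)]
  have h2 : PySem.Str.endswith k p = PySem.Chars.endswith k.toList p.toList := by
    simp [PySem.Str.endswith_eq]
  rw [h2]
  by_cases hs : p.toList <:+ k.toList
  · have hd := (List.suffix_iff_eq_drop).1 hs
    rw [hp] at hd
    have hb : (PySem.Str.slice k (some (-2)) none == p) = true := by
      rw [beq_iff_eq, ← String.toList_inj, h1, hd]
    rw [hb, ((PySem.Chars.endswith_iff _ _).2 hs)]
  · have he : PySem.Chars.endswith k.toList p.toList = false := by
      cases h : PySem.Chars.endswith k.toList p.toList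
      · rfl
      · exact absurd ((PySem.Chars.endswith_iff _ _).1 h) hs
    rw [he]
    cases h : (PySem.Str.slice k (some (-2)) none == p)
    · rfl
    · exfalso
      apply hs
      rw [beq_iff_eq] at h
      rw [List.suffix_iff_eq_drop, hp, ← h1, h]

-- the invariant of A's loop: the dict keeps its three keys in order; the counters gain the
-- number of words taking each branch
theorem loop_inv (ws : List String) (n a v : Int) :
    ((ws.foldl (fun wc k =>
      if PySem.Str.slice k (some (-2)) none == "yo" then
        wc.modify "adj" 0 (· + 1)
      else if PySem.Str.slice k (some (-2)) none == "ka" then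
        wc.modify "nouns" 0 (· + 1)
      else
        wc.modify "verbs" 0 (· + 1)) (PySem.Dict.mk [("nouns", n), ("adj", a), ("verbs", v)])).items)
    = [("nouns", n + (ws.countP (fun l => !(PySem.Str.slice l (some (-2)) none == "yo") &&
                                  (PySem.Str.slice l (some (-2)) none == "ka")) : Int)),
       ("adj", a + (ws.countP (fun l => PySem.Str.slice l (some (-2)) none == "yo") : Int)),
       ("verbs", v + (ws.countP (fun l => !(PySem.Str.slice l (some (-2)) none == "yo") &&
                                  !(PySem.Str.slice l (some (-2)) none == "ka")) : Int))] := by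
  induction ws generalizing n a v with
  | nil => simp
  | cons w ws ih =>
    simp only [List.foldl_cons, List.countP_cons]
    by_cases hy : (PySem.Str.slice w (some (-2)) none == "yo") = true
    · have hstep : ((PySem.Dict.mk [("nouns", n), ("adj", a), ("verbs", v)] : PySem.Dict String Int).modify "adj" 0 (· + 1)) = PySem.Dict.mk [("nouns", n), ("adj", a+1), ("verbs", v)] := by
        simp [PySem.Dict.modify, PySem.Dict.insert, PySem.Dict.getD, PySem.Dict.get?]
      rw [if_pos hy, hstep, ih]
      simp [hy]
      ring
    · by_cases hk : (PySem.Str.slice w (some (-2)) none == "ka") = true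
      · have hstep : ((PySem.Dict.mk [("nouns", n), ("adj", a), ("verbs", v)] : PySem.Dict String Int).modify "nouns" 0 (· + 1)) = PySem.Dict.mk [("nouns", n+1), ("adj", a), ("verbs", v)] := by
          simp [PySem.Dict.modify, PySem.Dict.insert, PySem.Dict.getD, PySem.Dict.get?]
        rw [if_neg hy, if_pos hk, hstep, ih]
        simp [hy, hk]
        ring
      · have hstep : ((PySem.Dict.mk [("nouns", n), ("adj", a), ("verbs", v)] : PySem.Dict String Int).modify "verbs" 0 (· + 1)) = PySem.Dict.mk [("nouns", n), ("adj", a), ("verbs", v+1)] := by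
          simp [PySem.Dict.modify, PySem.Dict.insert, PySem.Dict.getD, PySem.Dict.get?]
        rw [if_neg hy, if_neg hk, hstep, ih]
        simp [hy, hk]
        ring

-- a word ending in "ka" does not end in "yo", so A's elif-guard is redundant there
theorem not_yo_of_ka (l : String) (hk : (PySem.Str.slice l (some (-2)) none == "ka") = true) :
    (PySem.Str.slice l (some (-2)) none == "yo") = false := by
  rw [beq_iff_eq] at hk
  rw [hk]
  decide

-- the three branch predicates partition the list
theorem three_partition (ws : List String) :
    ws.countP (fun l => PySem.Str.slice l (some (-2)) none == "yo")
    + ws.countP (fun l => !(PySem.Str.slice l (some (-2)) none == "yo") &&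
                                  (PySem.Str.slice l (some (-2)) none == "ka"))
    + ws.countP (fun l => !(PySem.Str.slice l (some (-2)) none == "yo") &&
                                  !(PySem.Str.slice l (some (-2)) none == "ka"))
    = ws.length := by
  induction ws with
  | nil => simp
  | cons w ws ih =>
    simp only [List.countP_cons, List.length_cons]
    by_cases hy : (PySem.Str.slice w (some (-2)) none == "yo") = true <;>
      by_cases hk : (PySem.Str.slice w (some (-2)) none == "ka") = true <;>
        simp [hy, hk] <;> omega

-- ===== VERDICT (by name: the statement is the Claim_ definition above) =====
theorem count_word_classes_spec : Claim_equal_count_word_classes := by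
  intro file _
  unfold Spec_count_word_classes count_word_classes count_word_classes_alt pvFindWords
  simp only []
  rw [loop_inv]
  have hyo : (((PySem.Str.split? file "\n").getD []).countP
      (fun l => PySem.Str.slice l (some (-2)) none == "yo"))
      = ((PySem.Str.split? file "\n").getD []).countP (fun l => PySem.Str.endswith l "yo") :=
    List.countP_congr (fun l _ => by rw [slice2_eq_endswith l "yo" (by decide)])
  have hka : (((PySem.Str.split? file "\n").getD []).countP
      (fun l => !(PySem.Str.slice l (some (-2)) none == "yo") &&
                (PySem.Str.slice l (some (-2)) none == "ka")))
      = ((PySem.Str.split? file "\n").getD []).countP (fun l => PySem.Str.endswith l "ka") := by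
    refine List.countP_congr (fun l _ => ?_)
    rw [← slice2_eq_endswith l "ka" (by decide)]
    constructor
    · intro h
      exact (Bool.and_eq_true _ _ ▸ h).2
    · intro h
      simp [h, not_yo_of_ka l h]
  have hpart := three_partition ((PySem.Str.split? file "\n").getD [])
  rw [hyo, hka] at *
  simp only [zero_add, List.cons.injEq, Prod.mk.injEq, and_true, true_and]
  omega
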